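-- pv_equiv track=rewrite | github.com/paiml/depyler | examples/hard_wave3_041.py | bfs_level_sizes
-- ===== SOURCE A (Python) =====
-- from typing import Dict, List, Tuple
--
-- def bfs_level_sizes(adj: Dict[int, List[int]], start: int) -> List[int]:
--     """Return size of each BFS level."""
--     sizes: List[int] = []
--     visited: Dict[int, int] = {}
--     visited[start] = 1
--     current_level: List[int] = [start]
--     while len(current_level) > 0:
--         sizes.append(len(current_level))
--         next_level: List[int] = []
--         for node in current_level:
--             if node in adj:
--                 for nb in adj[node]:
--                     if nb not in visited:
--                         visited[nb] = 1
--                         next_level.append(nb)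
--         current_level = next_level
--     return sizes
-- ===== SOURCE B (Python) =====
-- from typing import Dict, List, Tuple
--
-- def bfs_level_sizes(adj: Dict[int, List[int]], start: int) -> List[int]:
--     """Return size of each BFS level."""
--     counts: List[int] = []
--     visited = {start}
--     queue: List[Tuple[int, int]] = [(start, 0)]
--     i = 0
--     while i < len(queue):
--         node, depth = queue[i]
--         i += 1
--         if depth == len(counts):
--             counts.append(0)
--         counts[depth] += 1
--         for nb in adj.get(node, []):
--             if nb not in visited:
--                 visited.add(nb)
--                 queue.append((nb, depth + 1))
--     return counts
-- ===== Notes on version B (the rewrite author's own statement) =====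
-- stated objective: alternative
-- what changed: Replaces the two alternating level lists and the visited dict with a single pointer-driven FIFO queue of (node, depth) pairs, a visited set, and a depth-indexed counter list bumped once per dequeued node.
import Mathlib
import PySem

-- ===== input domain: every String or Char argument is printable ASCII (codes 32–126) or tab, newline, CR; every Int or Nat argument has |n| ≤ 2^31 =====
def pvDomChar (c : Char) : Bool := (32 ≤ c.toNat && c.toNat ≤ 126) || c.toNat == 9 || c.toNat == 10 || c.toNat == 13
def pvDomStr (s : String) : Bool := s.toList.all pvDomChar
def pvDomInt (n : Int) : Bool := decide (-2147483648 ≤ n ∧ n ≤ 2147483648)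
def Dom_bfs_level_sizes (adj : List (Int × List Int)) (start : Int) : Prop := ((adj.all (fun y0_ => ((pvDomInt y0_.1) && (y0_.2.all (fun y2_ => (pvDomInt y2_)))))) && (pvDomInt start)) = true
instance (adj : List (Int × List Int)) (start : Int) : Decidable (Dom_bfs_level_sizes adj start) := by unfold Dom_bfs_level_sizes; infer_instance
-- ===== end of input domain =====

-- B is an alternative of the same cost: a single FIFO queue of (node, depth) pairs, a
-- visited SET and a depth-indexed counter list, instead of A's two alternating level
-- lists with a visited dict.

-- ===== PORT A =====
-- A's inner loop: "for nb in adj[node]: if nb not in visited: visited[nb]=1; next_level.append(nb)"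
def pvVisitFold (v : PySem.Dict Int Int) (out : List Int) (nbs : List Int) :
    (PySem.Dict Int Int) × List Int :=
  nbs.foldl (fun acc nb =>
    if acc.1.contains nb then acc else (acc.1.insert nb 1, acc.2 ++ [nb])) (v, out)

-- all neighbour values occurring in the adjacency dict (termination measure support)
def pvFlat (d : PySem.Dict Int (List Int)) : List Int := (d.items.map Prod.snd).flatten

-- number of not-yet-visited candidate nodes (termination measure for A's loop)
def pvUnv (d : PySem.Dict Int (List Int)) (v : PySem.Dict Int Int) : Nat :=
  ((pvFlat d).toFinset.filter (fun x => v.contains x = false)).card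

theorem pvUnv_insert (d : PySem.Dict Int (List Int)) (v : PySem.Dict Int Int) (nb : Int)
    (hmem : nb ∈ pvFlat d) (hc : v.contains nb = false) :
    pvUnv d (v.insert nb 1) + 1 = pvUnv d v := by
  have hset : ((pvFlat d).toFinset.filter (fun x => (v.insert nb 1).contains x = false))
      = ((pvFlat d).toFinset.filter (fun x => v.contains x = false)).erase nb := by
    ext x
    simp only [Finset.mem_filter, Finset.mem_erase, PySem.Dict.contains_insert]
    constructor
    · rintro ⟨hx, h⟩
      simp only [Bool.or_eq_false_iff, beq_eq_false_iff_ne] at h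
      exact ⟨h.1, hx, h.2⟩
    · rintro ⟨hne, hx, h⟩
      refine ⟨hx, ?_⟩
      simp [h, hne]
  have hnbmem : nb ∈ (pvFlat d).toFinset.filter (fun x => v.contains x = false) := by
    simp [Finset.mem_filter, List.mem_toFinset.2 hmem, hc]
  have hpos : 0 < ((pvFlat d).toFinset.filter (fun x => v.contains x = false)).card :=
    Finset.card_pos.2 ⟨nb, hnbmem⟩
  unfold pvUnv
  rw [hset, Finset.card_erase_of_mem hnbmem]
  omega

theorem pvVisitFold_measure (d : PySem.Dict Int (List Int)) :
    ∀ (nbs : List Int) (v : PySem.Dict Int Int) (out : List Int),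
    (∀ x ∈ nbs, x ∈ pvFlat d) →
    pvUnv d (pvVisitFold v out nbs).1 + ((pvVisitFold v out nbs).2).length
      ≤ pvUnv d v + out.length := by
  intro nbs
  induction nbs with
  | nil => intro v out _; simp [pvVisitFold]
  | cons nb rest ih =>
    intro v out hsub
    by_cases h : v.contains nb
    · have : pvVisitFold v out (nb :: rest) = pvVisitFold v out rest := by
        simp [pvVisitFold, h]
      rw [this]
      exact ih v out (fun x hx => hsub x (List.mem_cons_of_mem _ hx))
    · have h' : v.contains nb = false := by simpa using h
      have : pvVisitFold v out (nb :: rest)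
          = pvVisitFold (v.insert nb 1) (out ++ [nb]) rest := by
        simp [pvVisitFold, h']
      rw [this]
      have hstep := pvUnv_insert d v nb (hsub nb (List.mem_cons_self)) h'
      have := ih (v.insert nb 1) (out ++ [nb])
        (fun x hx => hsub x (List.mem_cons_of_mem _ hx))
      simp only [List.length_append, List.length_cons, List.length_nil] at this ⊢
      omega

theorem pvGet?_sub (d : PySem.Dict Int (List Int)) (node : Int) (l : List Int)
    (h : d.get? node = some l) : ∀ x ∈ l, x ∈ pvFlat d := by
  intro x hx
  have hmem := PySem.Dict.mem_items_of_get?_eq_some d h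
  unfold pvFlat
  exact List.mem_flatten.2 ⟨l, List.mem_map.2 ⟨(node, l), hmem, rfl⟩, hx⟩

-- one iteration of A's level processing: fold over the level, accumulating
-- (visited, next_level); the initial next_level accumulator is generalized to nxt
def pvStepA (d : PySem.Dict Int (List Int)) (v : PySem.Dict Int Int)
    (nxt : List Int) (cur : List Int) : (PySem.Dict Int Int) × List Int :=
  cur.foldl (fun acc node =>
    match d.get? node with
    | some nbs => pvVisitFold acc.1 acc.2 nbs
    | none => acc) (v, nxt)

theorem pvStepA_measure (d : PySem.Dict Int (List Int)) :
    ∀ (cur : List Int) (v : PySem.Dict Int Int) (nxt : List Int),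
    pvUnv d (pvStepA d v nxt cur).1 + ((pvStepA d v nxt cur).2).length
      ≤ pvUnv d v + nxt.length := by
  intro cur
  induction cur with
  | nil => intro v nxt; simp [pvStepA]
  | cons node rest ih =>
    intro v nxt
    cases hget : d.get? node with
    | none =>
      have : pvStepA d v nxt (node :: rest) = pvStepA d v nxt rest := by
        simp [pvStepA, List.foldl_cons, hget]
      rw [this]; exact ih v nxt
    | some nbs =>
      have hstep : pvStepA d v nxt (node :: rest)
          = pvStepA d (pvVisitFold v nxt nbs).1 ((pvVisitFold v nxt nbs).2) rest := by
        simp [pvStepA, List.foldl_cons, hget]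
      rw [hstep]
      have h1 := pvVisitFold_measure d nbs v nxt (pvGet?_sub d node nbs hget)
      have h2 := ih (pvVisitFold v nxt nbs).1 ((pvVisitFold v nxt nbs).2)
      omega

-- the while-loop of A ("while len(current_level) > 0")
def pvLoopA (d : PySem.Dict Int (List Int)) (v : PySem.Dict Int Int)
    (cur : List Int) (sizes : List Int) : List Int :=
  if h : cur = [] then sizes
  else
    pvLoopA d (pvStepA d v [] cur).1 (pvStepA d v [] cur).2
      (sizes ++ [(cur.length : Int)])
termination_by pvUnv d v + cur.length
decreasing_by
  have := pvStepA_measure d cur v []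
  have : cur.length ≠ 0 := fun hc => h (List.length_eq_zero_iff.1 hc)
  have := pvStepA_measure d cur v []
  simp only [List.length_nil] at this
  omega

def bfs_level_sizes (adj : List (Int × List Int)) (start : Int) : List Int :=
  pvLoopA (PySem.Dict.ofList adj) ((PySem.Dict.empty).insert start 1) [start] []

-- ===== PORT B =====
-- B's inner loop, by structural recursion on the neighbour list:
-- "for nb in adj.get(node, []): if nb not in visited: visited.add(nb); queue.append((nb, depth+1))"
-- (acc = (visited set, pairs appended so far))
def pvScanNbrs (depth : Nat) (acc : (PySem.Set Int) × List (Int × Nat)) :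
    List Int → (PySem.Set Int) × List (Int × Nat)
  | [] => acc
  | nb :: more =>
    if PySem.Set.contains acc.1 nb then pvScanNbrs depth acc more
    else pvScanNbrs depth (PySem.Set.add acc.1 nb, acc.2 ++ [(nb, depth + 1)]) more

-- candidate pool and count of nodes not yet in the visited set (B's termination measure)
def pvPool (d : PySem.Dict Int (List Int)) : List Int := d.values.flatten

def pvFresh (d : PySem.Dict Int (List Int)) (s : PySem.Set Int) : Nat :=
  ((pvPool d).toFinset.filter (fun x => x ∉ s)).card

theorem pvFresh_add (d : PySem.Dict Int (List Int)) (s : PySem.Set Int) (nb : Int)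
    (hmem : nb ∈ pvPool d) (hns : nb ∉ s) :
    pvFresh d (PySem.Set.add s nb) + 1 = pvFresh d s := by
  have hset : ((pvPool d).toFinset.filter (fun x => x ∉ PySem.Set.add s nb))
      = ((pvPool d).toFinset.filter (fun x => x ∉ s)).erase nb := by
    ext x
    simp only [Finset.mem_filter, Finset.mem_erase, PySem.Set.mem_add]
    tauto
  have hnbmem : nb ∈ (pvPool d).toFinset.filter (fun x => x ∉ s) := by
    simp [Finset.mem_filter, List.mem_toFinset.2 hmem, hns]
  unfold pvFresh
  rw [hset, Finset.card_erase_of_mem hnbmem]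
  have := Finset.card_pos.2 ⟨nb, hnbmem⟩
  omega

theorem pvScanNbrs_measure (d : PySem.Dict Int (List Int)) (depth : Nat) :
    ∀ (nbs : List Int) (s : PySem.Set Int) (q : List (Int × Nat)),
    (∀ x ∈ nbs, x ∈ pvPool d) →
    pvFresh d (pvScanNbrs depth (s, q) nbs).1 + ((pvScanNbrs depth (s, q) nbs).2).length
      ≤ pvFresh d s + q.length := by
  intro nbs
  induction nbs with
  | nil => intro s q _; simp [pvScanNbrs]
  | cons nb more ih =>
    intro s q hsub
    by_cases h : PySem.Set.contains s nb = true
    · rw [pvScanNbrs, if_pos h]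
      exact ih s q (fun x hx => hsub x (List.mem_cons_of_mem _ hx))
    · rw [pvScanNbrs, if_neg h]
      have hns : nb ∉ s := fun hmem => h ((PySem.Set.contains_iff s nb).2 hmem)
      have hstep := pvFresh_add d s nb (hsub nb List.mem_cons_self) hns
      have := ih (PySem.Set.add s nb) (q ++ [(nb, depth + 1)])
        (fun x hx => hsub x (List.mem_cons_of_mem _ hx))
      simp only [List.length_append, List.length_cons, List.length_nil] at this ⊢
      omega

theorem pvGetD_pool (d : PySem.Dict Int (List Int)) (node : Int) :
    ∀ x ∈ d.getD node [], x ∈ pvPool d := by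
  intro x hx
  cases hget : d.get? node with
  | none => rw [PySem.Dict.getD_eq_get?_getD, hget] at hx; simp at hx
  | some l =>
    rw [PySem.Dict.getD_eq_get?_getD, hget] at hx
    have hmem := PySem.Dict.mem_items_of_get?_eq_some d hget
    unfold pvPool PySem.Dict.values
    exact List.mem_flatten.2 ⟨l, List.mem_map.2 ⟨(node, l), hmem, rfl⟩, hx⟩

-- B's main loop: the unread part of the queue is `pending`; one node is dequeued,
-- its depth counter bumped (growing `counts` by a zero cell at a new depth), and
-- its fresh neighbours are appended
def pvLoopB (d : PySem.Dict Int (List Int)) (s : PySem.Set Int)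
    (counts : List Int) (pending : List (Int × Nat)) : List Int :=
  match pending with
  | [] => counts
  | (node, depth) :: rest =>
    let c1 := if depth = counts.length then counts ++ [0] else counts
    let c2 := c1.set depth (c1.getD depth 0 + 1)
    let r := pvScanNbrs depth (s, []) (d.getD node [])
    pvLoopB d r.1 c2 (rest ++ r.2)
termination_by 2 * pvFresh d s + pending.length
decreasing_by
  have := pvScanNbrs_measure d depth (d.getD node []) s [] (pvGetD_pool d node)
  simp only [List.length_nil, List.length_append, List.length_cons] at this ⊢
  omega

def bfs_level_sizes_alt (adj : List (Int × List Int)) (start : Int) : List Int :=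
  pvLoopB (PySem.Dict.ofList adj) (PySem.Set.add PySem.Set.empty start) [] [(start, 0)]

-- ===== PRECONDITION & SPEC =====
def Spec_bfs_level_sizes (adj : List (Int × List Int)) (start : Int) (out : List Int) : Prop := out = bfs_level_sizes_alt adj start
instance (adj : List (Int × List Int)) (start : Int) (out : List Int) : Decidable (Spec_bfs_level_sizes adj start out) := by unfold Spec_bfs_level_sizes; infer_instance

-- ===== CLAIM (what is proved, stated in full; the proofs are below) =====
def Claim_equal_bfs_level_sizes : Prop := ∀ (adj : List (Int × List Int)) (start : Int), Dom_bfs_level_sizes adj start → Spec_bfs_level_sizes adj start (bfs_level_sizes adj start)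

-- ===== LEMMAS AND PROOFS =====

-- the visited dict of A and the visited set of B hold the same nodes
def pvRel (v : PySem.Dict Int Int) (s : PySem.Set Int) : Prop :=
  ∀ x : Int, v.contains x = true ↔ x ∈ s

theorem pvRel_contains (v : PySem.Dict Int Int) (s : PySem.Set Int) (h : pvRel v s)
    (nb : Int) : v.contains nb = PySem.Set.contains s nb := by
  rw [Bool.eq_iff_iff, PySem.Set.contains_iff]
  exact h nb

theorem pvRel_add (v : PySem.Dict Int Int) (s : PySem.Set Int) (h : pvRel v s) (nb : Int) :
    pvRel (v.insert nb 1) (PySem.Set.add s nb) := by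
  intro x
  rw [PySem.Dict.contains_insert, PySem.Set.mem_add]
  simp only [Bool.or_eq_true, beq_iff_eq]
  rw [h x]
  tauto

-- A's inner fold with a nonempty accumulator just appends to the empty-start run
theorem pvVisitFold_shift :
    ∀ (nbs : List Int) (v : PySem.Dict Int Int) (out : List Int),
    pvVisitFold v out nbs
      = ((pvVisitFold v [] nbs).1, out ++ (pvVisitFold v [] nbs).2) := by
  intro nbs
  induction nbs with
  | nil => intro v out; simp [pvVisitFold]
  | cons nb rest ih =>
    intro v out
    by_cases h : v.contains nb
    · have e1 : ∀ o : List Int, pvVisitFold v o (nb :: rest) = pvVisitFold v o rest := by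
        intro o; simp [pvVisitFold, h]
      rw [e1, e1, ih v out]
    · have h' : v.contains nb = false := by simpa using h
      have e1 : ∀ o : List Int, pvVisitFold v o (nb :: rest)
          = pvVisitFold (v.insert nb 1) (o ++ [nb]) rest := by
        intro o; simp [pvVisitFold, h']
      rw [e1, e1, ih (v.insert nb 1) (out ++ [nb]), ih (v.insert nb 1) ([] ++ [nb])]
      simp

-- same for B's recursive scan
theorem pvScanNbrs_shift (depth : Nat) :
    ∀ (nbs : List Int) (s : PySem.Set Int) (q : List (Int × Nat)),
    pvScanNbrs depth (s, q) nbs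
      = ((pvScanNbrs depth (s, []) nbs).1, q ++ (pvScanNbrs depth (s, []) nbs).2) := by
  intro nbs
  induction nbs with
  | nil => intro s q; simp [pvScanNbrs]
  | cons nb rest ih =>
    intro s q
    by_cases h : PySem.Set.contains s nb = true
    · rw [pvScanNbrs, if_pos h, pvScanNbrs, if_pos h, ih s q]
    · rw [pvScanNbrs, if_neg h, pvScanNbrs, if_neg h,
        ih (PySem.Set.add s nb) (q ++ [(nb, depth + 1)]),
        ih (PySem.Set.add s nb) ([] ++ [(nb, depth + 1)])]
      simp

-- B's scan of one neighbour list is A's inner fold with depth tags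
theorem pvScan_rel (L : Nat) :
    ∀ (nbs : List Int) (v : PySem.Dict Int Int) (s : PySem.Set Int), pvRel v s →
    pvRel (pvVisitFold v [] nbs).1 (pvScanNbrs L (s, []) nbs).1 ∧
    (pvScanNbrs L (s, []) nbs).2
      = ((pvVisitFold v [] nbs).2).map (fun n => (n, L + 1)) := by
  intro nbs
  induction nbs with
  | nil => intro v s h; exact ⟨h, by simp [pvScanNbrs, pvVisitFold]⟩
  | cons nb rest ih =>
    intro v s h
    have hc := pvRel_contains v s h nb
    by_cases hb : v.contains nb = true
    · have hsb : PySem.Set.contains s nb = true := by rw [← hc]; exact hb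
      have eA : pvVisitFold v ([] : List Int) (nb :: rest) = pvVisitFold v [] rest := by
        simp [pvVisitFold, hb]
      have eB : pvScanNbrs L (s, []) (nb :: rest) = pvScanNbrs L (s, []) rest := by
        rw [pvScanNbrs, if_pos hsb]
      rw [eA, eB]; exact ih v s h
    · have hb' : v.contains nb = false := by simpa using hb
      have hsb : ¬ PySem.Set.contains s nb = true := by rw [← hc]; simp [hb']
      have eA : pvVisitFold v ([] : List Int) (nb :: rest)
          = pvVisitFold (v.insert nb 1) [nb] rest := by
        simp [pvVisitFold, hb']
      have eB : pvScanNbrs L (s, []) (nb :: rest)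
          = pvScanNbrs L (PySem.Set.add s nb, [(nb, L + 1)]) rest := by
        rw [pvScanNbrs, if_neg hsb]; simp
      obtain ⟨ih1, ih2⟩ := ih (v.insert nb 1) (PySem.Set.add s nb) (pvRel_add v s h nb)
      rw [eA, eB, pvVisitFold_shift rest (v.insert nb 1) [nb],
        pvScanNbrs_shift L rest (PySem.Set.add s nb) [(nb, L + 1)]]
      exact ⟨ih1, by simp [ih2]⟩

theorem pvConcat_getD (c : List Int) (k : Int) : (c ++ [k]).getD c.length 0 = k := by
  induction c with
  | nil => rfl
  | cons a t ih => simpa using ih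

theorem pvConcat_set (c : List Int) (k x : Int) : (c ++ [k]).set c.length x = c ++ [x] := by
  induction c with
  | nil => rfl
  | cons a t ih => simpa using ih

-- one step of A's level fold, rewritten through the empty-start inner fold
theorem pvStepA_cons (d : PySem.Dict Int (List Int)) (v : PySem.Dict Int Int)
    (nxt : List Int) (node : Int) (rest : List Int) :
    pvStepA d v nxt (node :: rest)
      = pvStepA d (pvVisitFold v [] (d.getD node [])).1
          (nxt ++ (pvVisitFold v [] (d.getD node [])).2) rest := by
  cases hget : d.get? node with
  | none => simp [pvStepA, List.foldl_cons, hget,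
      PySem.Dict.getD_eq_get?_getD, pvVisitFold]
  | some nbs =>
    have := pvVisitFold_shift nbs v nxt
    simp [pvStepA, List.foldl_cons, hget, PySem.Dict.getD_eq_get?_getD, this]

-- ghost B-side state after processing the remainder of one level node-by-node
def pvLevelS (d : PySem.Dict Int (List Int)) (L : Nat) (s : PySem.Set Int)
    (acc : List (Int × Nat)) : List Int → (PySem.Set Int) × List (Int × Nat)
  | [] => (s, acc)
  | node :: rest =>
    pvLevelS d L (pvScanNbrs L (s, []) (d.getD node [])).1
      (acc ++ (pvScanNbrs L (s, []) (d.getD node [])).2) rest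

-- the ghost level state tracks A's level fold
theorem pvLevel_rel (d : PySem.Dict Int (List Int)) (L : Nat) :
    ∀ (cur : List Int) (v : PySem.Dict Int Int) (s : PySem.Set Int)
      (nxt : List Int) (acc : List (Int × Nat)),
    pvRel v s → acc = nxt.map (fun n => (n, L + 1)) →
    pvRel (pvStepA d v nxt cur).1 (pvLevelS d L s acc cur).1 ∧
    (pvLevelS d L s acc cur).2 = ((pvStepA d v nxt cur).2).map (fun n => (n, L + 1)) := by
  intro cur
  induction cur with
  | nil => intro v s nxt acc h hacc; exact ⟨h, by simp [pvLevelS, pvStepA, hacc]⟩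
  | cons node rest ih =>
    intro v s nxt acc h hacc
    obtain ⟨h1, h2⟩ := pvScan_rel L (d.getD node []) v s h
    rw [pvStepA_cons, pvLevelS]
    exact ih (pvVisitFold v [] (d.getD node [])).1
      (pvScanNbrs L (s, []) (d.getD node [])).1
      (nxt ++ (pvVisitFold v [] (d.getD node [])).2)
      (acc ++ (pvScanNbrs L (s, []) (d.getD node [])).2) h1
      (by rw [hacc, h2, List.map_append])

-- running B through the rest of a level equals jumping to the ghost level state
theorem pvInnerB (d : PySem.Dict Int (List Int)) :
    ∀ (cur : List Int) (s : PySem.Set Int) (acc : List (Int × Nat))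
      (c : List Int) (k : Int),
    pvLoopB d s (c ++ [k]) (cur.map (fun n => (n, c.length)) ++ acc)
      = pvLoopB d (pvLevelS d c.length s acc cur).1 (c ++ [k + (cur.length : Int)])
          (pvLevelS d c.length s acc cur).2 := by
  intro cur
  induction cur with
  | nil => intro s acc c k; simp [pvLevelS]
  | cons node rest ih =>
    intro s acc c k
    rw [List.map_cons, List.cons_append, pvLoopB]
    have hdep : ¬ (c.length = (c ++ [k]).length) := by simp
    rw [if_neg hdep, pvConcat_getD, pvConcat_set]
    rw [List.append_assoc]
    rw [ih (pvScanNbrs c.length (s, []) (d.getD node [])).1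
        (acc ++ (pvScanNbrs c.length (s, []) (d.getD node [])).2) c (k + 1)]
    rw [pvLevelS]
    have : k + 1 + ((rest.length : Int)) = k + (((node :: rest).length : Int)) := by
      simp; ring
    rw [this]

-- main simulation: A's level loop equals B's queue loop at a level boundary
theorem pvMain (d : PySem.Dict Int (List Int)) :
    ∀ (v : PySem.Dict Int Int) (s : PySem.Set Int) (cur : List Int) (sizes : List Int),
    pvRel v s →
    pvLoopA d v cur sizes
      = pvLoopB d s sizes (cur.map (fun n => (n, sizes.length))) := by
  intro v s cur sizes h
  induction hi : pvUnv d v + cur.length using Nat.strong_induction_on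
    generalizing v s cur sizes with
  | _ m ih =>
  cases cur with
  | nil => rw [pvLoopA]; simp [pvLoopB]
  | cons node rest =>
    rw [pvLoopA, dif_neg (List.cons_ne_nil node rest)]
    rw [List.map_cons, pvLoopB]
    simp only [eq_self_iff_true, if_true]
    have hset : (sizes ++ [(0 : Int)]).set sizes.length
        ((sizes ++ [(0:Int)]).getD sizes.length 0 + 1) = sizes ++ [1] := by
      rw [pvConcat_set, pvConcat_getD]; norm_num
    rw [hset]
    rw [pvInnerB d rest (pvScanNbrs sizes.length (s, []) (d.getD node [])).1
        ((pvScanNbrs sizes.length (s, []) (d.getD node [])).2) sizes 1]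
    have hghost : pvLevelS d sizes.length
        (pvScanNbrs sizes.length (s, []) (d.getD node [])).1
        ((pvScanNbrs sizes.length (s, []) (d.getD node [])).2) rest
        = pvLevelS d sizes.length s [] (node :: rest) := by
      rw [pvLevelS]; simp
    rw [hghost]
    obtain ⟨hr1, hr2⟩ := pvLevel_rel d sizes.length (node :: rest) v s [] [] h (by simp)
    have hlen : (1 : Int) + (rest.length : Int) = (((node :: rest).length : Int)) := by
      push_cast [List.length_cons]; ring
    rw [hlen, hr2]
    have hmeas := pvStepA_measure d (node :: rest) v []
    simp only [List.length_nil, List.length_cons] at hmeas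
    have := ih (pvUnv d (pvStepA d v [] (node :: rest)).1
        + (pvStepA d v [] (node :: rest)).2.length)
      (by omega) (pvStepA d v [] (node :: rest)).1
      (pvLevelS d sizes.length s [] (node :: rest)).1
      (pvStepA d v [] (node :: rest)).2
      (sizes ++ [(((node :: rest).length : Int))]) hr1 rfl
    rw [this]
    simp

-- ===== VERDICT (by name: the statement is the Claim_ definition above) =====
theorem bfs_level_sizes_spec : Claim_equal_bfs_level_sizes := by
  intro adj start _
  unfold Spec_bfs_level_sizes bfs_level_sizes bfs_level_sizes_alt
  have hrel : pvRel ((PySem.Dict.empty).insert start 1)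
      (PySem.Set.add PySem.Set.empty start) := by
    intro x
    rw [PySem.Dict.contains_insert, PySem.Set.mem_add]
    simp [PySem.Set.empty]
  simpa using pvMain (PySem.Dict.ofList adj) ((PySem.Dict.empty).insert start 1)
    (PySem.Set.add PySem.Set.empty start) [start] [] hrel
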